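-- pv_equiv track=rewrite | github.com/xiaobaozidi/magma_g2fuzz | fuzzers/g2fuzz/repo/py_utils/func.py | extract_res_for_code_gen
-- ===== SOURCE A (Python) =====
-- def extract_res_for_code_gen(text):
--     res = None
--     valid = False
--
--     count = 0
--     modified_text = ""
--     lines = text.split("\n")
--     starts = []
--     ends = []
--     line_cnt = 0
--     for line in lines:
--         if line.startswith("```"):
--             if count % 2 == 0:
--                 starts.append(line_cnt)
--             else:
--                 ends.append(line_cnt)
--             count += 1
--         else:
--             modified_text += line + "\n"
--
--         line_cnt += 1
--
--     if len(starts) == 0 and len(ends) == 0: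
--         msg = "There is no code block in the input text. Please use Markdown syntax to represent code blocks. Please ensure that there is only one code block."
--
--         res = msg
--         valid = False
--     elif len(starts) != len(ends):
--         msg = "The code blocks in the input text are not conforming to the Markdown syntax."
--
--         res = msg
--         valid = False
--     elif len(starts) > 1:
--         msg = "There are several code blocks in the input text. Please ensure that there is only one code block."
--
--         res = msg
--         valid = False
--
--     if res:
--         # did not generate the code block
--         return res, valid
--
--     res = "\n".join(lines[starts[0]+1:ends[0]])
--
--     if "./tmp" not in res:
--         msg = "You should save the generated files into `./tmp/`."
--
--         res = msg
--         valid = False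
--         return res, valid
--
--     valid = True
--     return res, valid
-- ===== SOURCE B (Python) =====
-- def extract_res_for_code_gen(text):
--     # Streaming state machine: collect the first block's lines directly while
--     # classifying the input with two counters; no index lists, no slicing.
--     body = []
--     in_block = False
--     blocks_done = 0
--     for line in text.split("\n"):
--         if line.startswith("```"):
--             if in_block:
--                 in_block = False
--                 blocks_done += 1
--             else:
--                 in_block = True
--         elif in_block and blocks_done == 0:
--             body.append(line)
--     total = 2 * blocks_done + (1 if in_block else 0)
--     if total == 0:
--         return ("There is no code block in the input text. Please use Markdown syntax to represent code blocks. Please ensure that there is only one code block.", False)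
--     if total % 2 == 1:
--         return ("The code blocks in the input text are not conforming to the Markdown syntax.", False)
--     if total > 2:
--         return ("There are several code blocks in the input text. Please ensure that there is only one code block.", False)
--     res = "\n".join(body)
--     if "./tmp" in res:
--         return (res, True)
--     return ("You should save the generated files into `./tmp/`.", False)
-- ===== Notes on version B (the rewrite author's own statement) =====
-- stated objective: alternative
-- what changed: Replaces A's index bookkeeping (collecting fence line numbers into starts/ends lists and slicing the line array between them) with a streaming open/close state machine that accumulates the first block's lines directly as it scans, so no indices and no slice exist.
import Mathlib
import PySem

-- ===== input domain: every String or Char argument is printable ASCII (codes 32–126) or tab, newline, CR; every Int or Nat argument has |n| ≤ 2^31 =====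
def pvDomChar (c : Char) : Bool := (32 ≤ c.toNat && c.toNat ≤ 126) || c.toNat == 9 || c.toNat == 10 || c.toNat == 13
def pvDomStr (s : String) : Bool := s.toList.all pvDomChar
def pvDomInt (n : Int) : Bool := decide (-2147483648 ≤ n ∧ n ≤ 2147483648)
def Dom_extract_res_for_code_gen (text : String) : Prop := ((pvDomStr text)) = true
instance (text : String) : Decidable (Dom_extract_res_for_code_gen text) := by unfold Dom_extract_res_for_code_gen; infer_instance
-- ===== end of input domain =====

-- B replaces A's fence-index bookkeeping and array slicing by a streaming open/close state
-- machine that accumulates the first block's lines directly (objective: alternative).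

-- ===== PORT A =====
-- A's for-loop: state (count, starts, ends, line_cnt, modified_text), transliterated as structural recursion.
def pvLoopA : List String → Int → List Int → List Int → Int → List Char → Int × List Int × List Int × Int × List Char
  | [], count, starts, ends, lc, mt => (count, starts, ends, lc, mt)
  | l :: ls, count, starts, ends, lc, mt =>
    if PySem.Str.startswith l "```" then
      if PySem.Int.mod count 2 = 0 then pvLoopA ls (count + 1) (starts ++ [lc]) ends (lc + 1) mt
      else pvLoopA ls (count + 1) starts (ends ++ [lc]) (lc + 1) mt
    else pvLoopA ls count starts ends (lc + 1) (mt ++ l.toList ++ ['\n'])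

def extract_res_for_code_gen (text : String) : String × Bool :=
  let lines := (PySem.Str.split? text "\n").getD []
  let r := pvLoopA lines 0 [] [] 0 []
  let starts := r.2.1
  let ends := r.2.2.1
  if starts.length = 0 ∧ ends.length = 0 then
    ("There is no code block in the input text. Please use Markdown syntax to represent code blocks. Please ensure that there is only one code block.", false)
  else if ¬ (starts.length = ends.length) then
    ("The code blocks in the input text are not conforming to the Markdown syntax.", false)
  else if starts.length > 1 then
    ("There are several code blocks in the input text. Please ensure that there is only one code block.", false)
  else
    let res := PySem.Str.join "\n"
      (PySem.List.slice lines (some (PySem.List.pyGetD starts 0 0 + 1)) (some (PySem.List.pyGetD ends 0 0)))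
    if PySem.Str.isIn "./tmp" res = false then
      ("You should save the generated files into `./tmp/`.", false)
    else (res, true)

-- ===== PORT B =====
-- B's for-loop: state (body, in_block, blocks_done).
def pvLoopB : List String → List String → Bool → Int → List String × Bool × Int
  | [], body, inb, done => (body, inb, done)
  | l :: ls, body, inb, done =>
    if PySem.Str.startswith l "```" then
      if inb then pvLoopB ls body false (done + 1)
      else pvLoopB ls body true done
    else if inb ∧ done = 0 then pvLoopB ls (body ++ [l]) inb done
    else pvLoopB ls body inb done

def extract_res_for_code_gen_alt (text : String) : String × Bool :=
  let lines := (PySem.Str.split? text "\n").getD []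
  let r := pvLoopB lines [] false 0
  let total : Int := 2 * r.2.2 + (if r.2.1 then 1 else 0)
  if total = 0 then
    ("There is no code block in the input text. Please use Markdown syntax to represent code blocks. Please ensure that there is only one code block.", false)
  else if PySem.Int.mod total 2 = 1 then
    ("The code blocks in the input text are not conforming to the Markdown syntax.", false)
  else if total > 2 then
    ("There are several code blocks in the input text. Please ensure that there is only one code block.", false)
  else
    let res := PySem.Str.join "\n" r.1
    if PySem.Str.isIn "./tmp" res then (res, true)
    else ("You should save the generated files into `./tmp/`.", false)

-- ===== PRECONDITION & SPEC =====
def Spec_extract_res_for_code_gen (text : String) (out : String × Bool) : Prop := out = extract_res_for_code_gen_alt text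
instance (text : String) (out : String × Bool) : Decidable (Spec_extract_res_for_code_gen text out) := by unfold Spec_extract_res_for_code_gen; infer_instance

-- ===== CLAIM (what is proved, stated in full; the proofs are below) =====
def Claim_equal_extract_res_for_code_gen : Prop := ∀ (text : String), Dom_extract_res_for_code_gen text → Spec_extract_res_for_code_gen text (extract_res_for_code_gen text)

-- ===== LEMMAS AND PROOFS =====

-- the fence indices of the lines, counting from lc
def pvFences : List String → Int → List Int
  | [], _ => []
  | l :: ls, lc => if PySem.Str.startswith l "```" then lc :: pvFences ls (lc + 1) else pvFences ls (lc + 1)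

mutual
def pvEvens : List Int → List Int
  | [] => []
  | x :: xs => x :: pvOdds xs
def pvOdds : List Int → List Int
  | [] => []
  | _ :: xs => pvEvens xs
end

lemma pvEvens_odds_length (xs : List Int) :
    (pvEvens xs).length = (xs.length + 1) / 2 ∧ (pvOdds xs).length = xs.length / 2 := by
  induction xs with
  | nil => simp [pvEvens, pvOdds]
  | cons x xs ih =>
    refine ⟨?_, ?_⟩
    · simp only [pvEvens, List.length_cons, ih.2]; omega
    · simp only [pvOdds, ih.1, List.length_cons]

lemma pvLoopA_spec (ls : List String) (count : Int) (starts ends : List Int) (lc : Int) (mt : List Char) :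
    (pvLoopA ls count starts ends lc mt).2.1 =
      starts ++ (if PySem.Int.mod count 2 = 0 then pvEvens (pvFences ls lc) else pvOdds (pvFences ls lc)) ∧
    (pvLoopA ls count starts ends lc mt).2.2.1 =
      ends ++ (if PySem.Int.mod count 2 = 0 then pvOdds (pvFences ls lc) else pvEvens (pvFences ls lc)) := by
  induction ls generalizing count starts ends lc mt with
  | nil => simp [pvLoopA, pvFences, pvEvens, pvOdds]
  | cons l ls ih =>
    have hme : ∀ c : Int, PySem.Int.mod c 2 = c % 2 :=
      fun c => PySem.Int.mod_eq_emod_of_pos (a := c) (by norm_num)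
    by_cases h : PySem.Str.startswith l "```" = true
    · by_cases hc : PySem.Int.mod count 2 = 0
      · have h1 : ¬ PySem.Int.mod (count + 1) 2 = 0 := by rw [hme] at hc ⊢; omega
        simp only [pvLoopA, pvFences, h, if_pos hc, if_true, if_neg h1,
          (ih (count + 1) (starts ++ [lc]) ends (lc + 1) mt).1,
          (ih (count + 1) (starts ++ [lc]) ends (lc + 1) mt).2]
        constructor <;> simp [pvEvens, pvOdds]
      · have h1 : PySem.Int.mod (count + 1) 2 = 0 := by
          rw [hme] at hc ⊢; omega
        simp only [pvLoopA, pvFences, h, if_neg hc, if_true, if_pos h1,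
          (ih (count + 1) starts (ends ++ [lc]) (lc + 1) mt).1,
          (ih (count + 1) starts (ends ++ [lc]) (lc + 1) mt).2]
        constructor <;> simp [pvEvens, pvOdds]
    · simp only [pvLoopA, pvFences, h, if_false, Bool.false_eq_true,
        (ih count starts ends (lc + 1) (mt ++ l.toList ++ ['\n'])).1,
        (ih count starts ends (lc + 1) (mt ++ l.toList ++ ['\n'])).2]
      simp

lemma pvFences_length (ls : List String) (lc lc' : Int) :
    (pvFences ls lc).length = (pvFences ls lc').length := by
  induction ls generalizing lc lc' with
  | nil => rfl
  | cons l ls ih =>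
    by_cases h : PySem.Str.startswith l "```" = true
    · simp only [pvFences, if_pos h, List.length_cons, ih (lc + 1) (lc' + 1)]
    · simp only [pvFences, if_neg h, ih (lc + 1) (lc' + 1)]

-- B's loop counters track the fence count; the body is only touched while in the first block.
lemma pvLoopB_count (ls : List String) (body : List String) (inb : Bool) (done : Int) :
    2 * (pvLoopB ls body inb done).2.2 + (if (pvLoopB ls body inb done).2.1 then (1:Int) else 0) =
      2 * done + (if inb then 1 else 0) + (pvFences ls 0).length := by
  induction ls generalizing body inb done with
  | nil => simp [pvLoopB, pvFences]
  | cons l ls ih =>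
    have hlen1 := pvFences_length ls 1 0
    by_cases h : PySem.Str.startswith l "```" = true
    · cases inb with
      | false =>
        simp only [pvLoopB, if_pos h, Bool.false_eq_true, if_false, pvFences,
          List.length_cons, ih, if_true]
        push_cast
        rw [hlen1]
        omega
      | true =>
        simp only [pvLoopB, if_pos h, if_true, pvFences, List.length_cons, ih]
        push_cast
        rw [hlen1]
        omega
    · by_cases hc : inb = true ∧ done = 0
      · simp only [pvLoopB, if_neg h, if_pos hc, pvFences, ih]
        rw [pvFences_length ls (0 + 1) 0]
      · simp only [pvLoopB, if_neg h, if_neg hc, pvFences, ih]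
        rw [pvFences_length ls (0 + 1) 0]


lemma pvLoopB_append (as bs : List String) (body : List String) (inb : Bool) (done : Int) :
    pvLoopB (as ++ bs) body inb done =
      pvLoopB bs (pvLoopB as body inb done).1 (pvLoopB as body inb done).2.1 (pvLoopB as body inb done).2.2 := by
  induction as generalizing body inb done with
  | nil => simp [pvLoopB]
  | cons l ls ih =>
    by_cases h : PySem.Str.startswith l "```" = true
    · cases inb with
      | false => simp only [List.cons_append, pvLoopB, if_pos h, Bool.false_eq_true, if_false, ih]
      | true => simp only [List.cons_append, pvLoopB, if_pos h, if_true, ih]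
    · by_cases hc : inb = true ∧ done = 0
      · simp only [List.cons_append, pvLoopB, if_neg h, if_pos hc, ih]
      · simp only [List.cons_append, pvLoopB, if_neg h, if_neg hc, ih]

lemma pvLoopB_skip (ls : List String) (body : List String) (inb : Bool) (done : Int)
    (hf : ∀ l ∈ ls, ¬ PySem.Str.startswith l "```" = true)
    (hs : ¬ (inb = true ∧ done = 0)) :
    pvLoopB ls body inb done = (body, inb, done) := by
  induction ls with
  | nil => rfl
  | cons l ls ih =>
    simp only [pvLoopB, if_neg (hf l (by simp)), if_neg hs]
    exact ih (fun x hx => hf x (by simp [hx]))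

lemma pvLoopB_collect (ls : List String) (body : List String)
    (hf : ∀ l ∈ ls, ¬ PySem.Str.startswith l "```" = true) :
    pvLoopB ls body true 0 = (body ++ ls, true, 0) := by
  induction ls generalizing body with
  | nil => simp [pvLoopB]
  | cons l ls ih =>
    rw [show pvLoopB (l :: ls) body true 0 = pvLoopB ls (body ++ [l]) true 0 from by
      simp only [pvLoopB, if_neg (hf l (by simp))]
      simp]
    rw [ih (body ++ [l]) (fun x hx => hf x (by simp [hx]))]
    simp

-- decompositions of a line list by its fence count
lemma pvFences_nil (ls : List String) (lc : Int) (h : pvFences ls lc = []) :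
    ∀ l ∈ ls, ¬ PySem.Str.startswith l "```" = true := by
  induction ls generalizing lc with
  | nil => simp
  | cons l ls ih =>
    by_cases hl : PySem.Str.startswith l "```" = true
    · simp only [pvFences, if_pos hl] at h
      exact absurd h (List.cons_ne_nil _ _)
    · simp only [pvFences, if_neg hl] at h
      intro x hx
      rcases List.mem_cons.1 hx with rfl | hx
      · exact hl
      · exact ih (lc + 1) h x hx

lemma pvFences_one (ls : List String) (lc : Int) (b : Int) (h : pvFences ls lc = [b]) :
    ∃ v y w, ls = v ++ y :: w ∧ (∀ l ∈ v, ¬ PySem.Str.startswith l "```" = true) ∧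
      PySem.Str.startswith y "```" = true ∧ (∀ l ∈ w, ¬ PySem.Str.startswith l "```" = true) ∧
      b = lc + v.length := by
  induction ls generalizing lc with
  | nil => simp [pvFences] at h
  | cons l ls ih =>
    by_cases hl : PySem.Str.startswith l "```" = true
    · simp only [pvFences, if_pos hl, List.cons.injEq] at h
      exact ⟨[], l, ls, by simp, by simp, hl, pvFences_nil ls (lc + 1) h.2, by simp [h.1]⟩
    · simp only [pvFences, if_neg hl] at h
      obtain ⟨v, y, w, h1, h2, h3, h4, h5⟩ := ih (lc + 1) h
      refine ⟨l :: v, y, w, by simp [h1], ?_, h3, h4, by simp [h5]; omega⟩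
      intro x hx; rcases List.mem_cons.1 hx with rfl | hx
      · exact hl
      · exact h2 x hx

lemma pvFences_two (ls : List String) (lc : Int) (a b : Int) (h : pvFences ls lc = [a, b]) :
    ∃ u x v y w, ls = u ++ x :: (v ++ y :: w) ∧
      (∀ l ∈ u, ¬ PySem.Str.startswith l "```" = true) ∧
      PySem.Str.startswith x "```" = true ∧
      (∀ l ∈ v, ¬ PySem.Str.startswith l "```" = true) ∧
      PySem.Str.startswith y "```" = true ∧
      (∀ l ∈ w, ¬ PySem.Str.startswith l "```" = true) ∧
      a = lc + u.length ∧ b = lc + u.length + 1 + v.length := by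
  induction ls generalizing lc with
  | nil => simp [pvFences] at h
  | cons l ls ih =>
    by_cases hl : PySem.Str.startswith l "```" = true
    · simp only [pvFences, if_pos hl, List.cons.injEq] at h
      obtain ⟨v, y, w, h1, h2, h3, h4, h5⟩ := pvFences_one ls (lc + 1) b h.2
      exact ⟨[], l, v, y, w, by simp [h1], by simp, hl, h2, h3, h4,
        by simp [h.1], by simp [h5]⟩
    · simp only [pvFences, if_neg hl] at h
      obtain ⟨u, x, v, y, w, e1, e2, e3, e4, e5, e6, e7, e8⟩ := ih (lc + 1) h
      refine ⟨l :: u, x, v, y, w, by simp [e1], ?_, e3, e4, e5, e6, by simp [e7]; omega, by simp [e8]; omega⟩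
      intro z hz; rcases List.mem_cons.1 hz with rfl | hz
      · exact hl
      · exact e2 z hz

-- ===== VERDICT (by name: the statement is the Claim_ definition above) =====
theorem extract_res_for_code_gen_spec : Claim_equal_extract_res_for_code_gen := by
  intro text _
  unfold Spec_extract_res_for_code_gen
  simp only [extract_res_for_code_gen, extract_res_for_code_gen_alt]
  set lines := (PySem.Str.split? text "\n").getD [] with hlines
  have hA := pvLoopA_spec lines 0 [] [] 0 []
  have h0 : PySem.Int.mod 0 2 = 0 := by decide
  rw [h0] at hA
  simp only [if_true, List.nil_append] at hA
  rw [hA.1, hA.2]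
  set rB := pvLoopB lines [] false 0 with hrB
  have hB := pvLoopB_count lines [] false 0
  rw [← hrB] at hB
  simp only [Bool.false_eq_true, if_false, mul_zero, zero_add] at hB
  set F := pvFences lines 0 with hF
  have hlen := pvEvens_odds_length F
  have hmod : ∀ c : Int, PySem.Int.mod c 2 = c % 2 :=
    fun c => PySem.Int.mod_eq_emod_of_pos (a := c) (by norm_num)
  by_cases hz : F.length = 0
  · have hFn : F = [] := List.eq_nil_of_length_eq_zero hz
    rw [hFn] at hB
    simp only [List.length_nil, Nat.cast_zero] at hB
    rw [if_pos hB]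
    simp [hFn, pvEvens, pvOdds]
  · by_cases hodd : F.length % 2 = 1
    · have h1 : ¬ ((pvEvens F).length = 0 ∧ (pvOdds F).length = 0) := by omega
      have h2 : ¬ ((pvEvens F).length = (pvOdds F).length) := by omega
      have b1 : ¬ (2 * rB.2.2 + (if rB.2.1 = true then (1:Int) else 0) = 0) := by omega
      have b2 : PySem.Int.mod (2 * rB.2.2 + (if rB.2.1 = true then (1:Int) else 0)) 2 = 1 := by
        rw [hmod]; omega
      rw [if_neg h1, if_pos h2, if_neg b1, if_pos b2]
    · by_cases hbig : F.length > 2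
      · have h1 : ¬ ((pvEvens F).length = 0 ∧ (pvOdds F).length = 0) := by omega
        have h2 : (pvEvens F).length = (pvOdds F).length := by omega
        have h3 : (pvEvens F).length > 1 := by omega
        have b1 : ¬ (2 * rB.2.2 + (if rB.2.1 = true then (1:Int) else 0) = 0) := by omega
        have b2 : ¬ PySem.Int.mod (2 * rB.2.2 + (if rB.2.1 = true then (1:Int) else 0)) 2 = 1 := by
          rw [hmod]; omega
        have b3 : 2 * rB.2.2 + (if rB.2.1 = true then (1:Int) else 0) > 2 := by omega
        rw [if_neg h1, if_neg (by omega : ¬ ¬ ((pvEvens F).length = (pvOdds F).length)),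
          if_pos h3, if_neg b1, if_neg b2, if_pos b3]
      · -- exactly two fences
        have hlen2 : F.length = 2 := by omega
        obtain ⟨a, b, hab⟩ : ∃ a b, F = [a, b] := by
          match F, hlen2 with
          | [a, b], _ => exact ⟨a, b, rfl⟩
        obtain ⟨u, x, v, y, w, e1, e2, e3, e4, e5, e6, e7, e8⟩ :=
          pvFences_two lines 0 a b (by rw [← hF, hab])
        -- B's loop ends with body v, closed, one block done
        have hrv : rB = (v, false, 1) := by
          have su : pvLoopB u [] false 0 = ([], false, 0) :=
            pvLoopB_skip u [] false 0 e2 (by simp)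
          have sv : pvLoopB v [] true 0 = (v, true, 0) := by
            simpa using pvLoopB_collect v [] e4
          have sw : pvLoopB w v false 1 = (v, false, 1) :=
            pvLoopB_skip w v false 1 e6 (by simp)
          rw [hrB, e1, pvLoopB_append, su]
          show pvLoopB (x :: (v ++ y :: w)) [] false 0 = (v, false, 1)
          rw [show pvLoopB (x :: (v ++ y :: w)) [] false 0 = pvLoopB (v ++ y :: w) [] true 0 from by
            simp only [pvLoopB, if_pos e3, Bool.false_eq_true, if_false]]
          rw [pvLoopB_append, sv]
          show pvLoopB (y :: w) v true 0 = (v, false, 1)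
          rw [show pvLoopB (y :: w) v true 0 = pvLoopB w v false 1 from by
            simp only [pvLoopB, if_pos e5, if_true, zero_add]]
          exact sw
        -- A's slice is exactly v
        have hsl : PySem.List.slice lines (some (a + 1)) (some b) = v := by
          have ha1 : a + 1 = ((u.length + 1 : Nat) : Int) := by push_cast; omega
          have hb1 : b = ((u.length + 1 + v.length : Nat) : Int) := by push_cast; omega
          rw [ha1, hb1, PySem.List.slice_natCast]
          rw [show u.length + 1 + v.length - (u.length + 1) = v.length from by omega]
          rw [e1, show u ++ x :: (v ++ y :: w) = (u ++ [x]) ++ (v ++ y :: w) from by simp]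
          rw [show u.length + 1 = (u ++ [x]).length from by simp, List.drop_left]
          simp
        rw [hab]
        have g1 : ¬ ((pvEvens [a, b]).length = 0 ∧ (pvOdds [a, b]).length = 0) := by
          simp [pvEvens, pvOdds]
        rw [if_neg g1]
        rw [if_neg (show ¬ ¬ ((pvEvens [a, b]).length = (pvOdds [a, b]).length) from by
          simp [pvEvens, pvOdds])]
        rw [if_neg (show ¬ ((pvEvens [a, b]).length > 1) from by simp [pvEvens, pvOdds])]
        rw [hrv]
        simp only [pvEvens, pvOdds]
        rw [show PySem.List.pyGetD [a] 0 0 = a from rfl, show PySem.List.pyGetD [b] 0 0 = b from rfl]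
        rw [hsl]
        norm_num
        cases hc : PySem.Chars.isIn "./tmp".toList (PySem.Chars.join "\n".toList (List.map String.toList v)) <;>
          simp
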